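-- pv_equiv track=rewrite | github.com/Pr0x1mo/BackEndCodingChallenge_Python | pinFinder.py | solution
-- ===== SOURCE A (Python) =====
-- def solution (pin):
--
--     adjacent = {
--         '1':['1','2','4'],
--         '2':['1','2','3','5'],
--         '3':['2','3','6'],
--         '4':['1','4','5','7'],
--         '5':['2','4','5','6','8'],
--         '6':['3', '5', '6','9'],
--         '7':['4', '7', '8'],
--         '8':['5','7','8','9','0'],
--         '9':['6','8','9'],
--         '0':['8','0']
--     }
--
--     def generate_pins(current_pin, index):
--         if index ==len(pin):
--             results.append(current_pin)
--             return
--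
--         current_digit= pin[index]
--         for adj_digit in adjacent[current_digit]:
--             generate_pins(current_pin + adj_digit, index +1)
--
--     results = []
--     generate_pins('',0)
--     results = sorted(set(results))
--     return results
-- ===== SOURCE B (Python) =====
-- import itertools
--
-- def solution(pin):
--     adjacent = {
--         '1': ['1', '2', '4'],
--         '2': ['1', '2', '3', '5'],
--         '3': ['2', '3', '6'],
--         '4': ['1', '4', '5', '7'],
--         '5': ['2', '4', '5', '6', '8'],
--         '6': ['3', '5', '6', '9'],
--         '7': ['4', '7', '8'],
--         '8': ['5', '7', '8', '9', '0'],
--         '9': ['6', '8', '9'],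
--         '0': ['8', '0']
--     }
--     lists = [adjacent[d] for d in pin]
--     return sorted(set(''.join(t) for t in itertools.product(*lists)))
-- ===== Notes on version B (the rewrite author's own statement) =====
-- stated objective: idiomatic
-- what changed: Replaces the recursive DFS with a mutated accumulator list by an iterative Cartesian-product enumeration (itertools.product over per-position option lists) joined into strings, then sorted(set(...)) as before.
import Mathlib
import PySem

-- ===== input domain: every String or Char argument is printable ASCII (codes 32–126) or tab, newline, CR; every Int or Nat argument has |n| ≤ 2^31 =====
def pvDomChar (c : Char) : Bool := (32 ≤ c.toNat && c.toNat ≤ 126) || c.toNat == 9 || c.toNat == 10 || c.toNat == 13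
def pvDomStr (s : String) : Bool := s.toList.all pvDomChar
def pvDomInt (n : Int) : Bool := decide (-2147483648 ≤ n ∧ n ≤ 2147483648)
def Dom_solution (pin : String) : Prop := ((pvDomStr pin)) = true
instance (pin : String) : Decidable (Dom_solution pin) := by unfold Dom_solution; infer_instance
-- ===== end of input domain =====

-- B replaces A's recursive DFS accumulator by an iterative Cartesian-product enumeration (idiomatic; same cost).

-- the adjacency table shared by both Pythons (dict lookup; total here, Pre_ excludes the KeyError inputs)
def adjTable (c : Char) : List String :=
  match c with
  | '1' => ["1","2","4"]
  | '2' => ["1","2","3","5"]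
  | '3' => ["2","3","6"]
  | '4' => ["1","4","5","7"]
  | '5' => ["2","4","5","6","8"]
  | '6' => ["3","5","6","9"]
  | '7' => ["4","7","8"]
  | '8' => ["5","7","8","9","0"]
  | '9' => ["6","8","9"]
  | '0' => ["8","0"]
  | _ => []

-- ===== PORT A =====
-- generate_pins: DFS appending completed pins to `results` (the appends form the foldl accumulator)
def genPinsA : List Char → String → List String
  | [], cur => [cur]
  | c :: rest, cur =>
      (adjTable c).foldl (fun acc d => acc ++ genPinsA rest (cur ++ d)) []

def solution (pin : String) : List String :=
  PySem.List.sorted (PySem.Set.ofList (genPinsA pin.toList "")) (fun x => x) false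

-- ===== PORT B =====
-- itertools.product(*lists) with each tuple joined: first list varies slowest
def prodJoinB : List (List String) → List String
  | [] => [""]
  | l :: rest => l.flatMap (fun d => (prodJoinB rest).map (fun s => d ++ s))

def solution_alt (pin : String) : List String :=
  PySem.List.sorted (PySem.Set.ofList (prodJoinB (pin.toList.map adjTable))) (fun x => x) false

-- ===== PRECONDITION & SPEC =====
-- Pre_: every character of pin is a decimal digit; on any other character both Pythons raise KeyError.
def Pre_solution (pin : String) : Prop := pin.toList.all Char.isDigit = true
instance (pin : String) : Decidable (Pre_solution pin) := by unfold Pre_solution; infer_instance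
def pvWitness_solution : String := "123"

def Spec_solution (pin : String) (out : List String) : Prop := out = solution_alt pin
instance (pin : String) (out : List String) : Decidable (Spec_solution pin out) := by unfold Spec_solution; infer_instance

-- ===== CLAIM (what is proved, stated in full; the proofs are below) =====
def Claim_equal_solution : Prop := ∀ (pin : String), Dom_solution pin → Pre_solution pin → Spec_solution pin (solution pin)

-- ===== LEMMAS AND PROOFS =====

-- A's DFS from prefix `cur` is the product of the remaining positions, each prefixed by `cur`
theorem genPinsA_eq_prod (cs : List Char) : ∀ cur : String,
    genPinsA cs cur = (prodJoinB (cs.map adjTable)).map (fun s => cur ++ s) := by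
  induction cs with
  | nil => intro cur; simp [genPinsA, prodJoinB]
  | cons c rest ih =>
      intro cur
      simp only [genPinsA, prodJoinB, List.map_cons, List.map_flatMap,
        PySem.List.foldl_append_eq_flatMap]
      refine List.flatMap_congr ?_
      intro d _
      rw [ih (cur ++ d)]
      simp [List.map_map, Function.comp, String.append_assoc]

-- ===== VERDICT (by name: the statement is the Claim_ definition above) =====
theorem solution_spec : Claim_equal_solution := by
  intro pin _ _
  unfold Spec_solution solution solution_alt
  rw [genPinsA_eq_prod]
  simp
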